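-- pv_equiv track=rewrite | github.com/Matematik411/Project_Euler | Euler_vol2.py | naloga77
-- ===== SOURCE A (Python) =====
-- def naloga31(vrednost, seznam):
--     '''How many different ways can vrednost be made using any number of coins?'''
--     if seznam == []:
--         return 0
--     vrednost -= seznam[0]
--     if vrednost == 0:
--         vrednost += seznam[0]
--         return 1 + naloga31(vrednost, seznam[1:])
--     elif vrednost < 0:
--         vrednost += seznam[0]
--         return naloga31(vrednost, seznam[1:])
--     elif vrednost > 0:
--         return naloga31(vrednost, seznam) + naloga31(vrednost + seznam[0], seznam[1:])
--
-- def naloga77(n):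
--     '''What is the first value which can be written as the sum of primes in over n different ways?'''
--     seznam_prastevil = [2]
--     k = 3
--     i = 5
--     while True:
--         i += 1
--         while seznam_prastevil[-1] < i:
--             kazalec = True
--             for a in seznam_prastevil:
--                 if k % a == 0:
--                     kazalec = False
--                     break
--             if kazalec:
--                 seznam_prastevil.append(k)
--             k += 1
--         #naloga31(n, seznam) vrne stevilo moznih zapisov stevila n z vrednostmi iz seznama
--         if naloga31(i, seznam_prastevil) > n:
--             return(i)
-- ===== SOURCE B (Python) =====
-- def naloga77(n):
--     primes = [2]
--     k = 3
--     i = 5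
--     while True:
--         i += 1
--         while primes[-1] < i:
--             if all(k % p for p in primes):
--                 primes.append(k)
--             k += 1
--         ways = [1] + [0] * i
--         for p in reversed(primes):
--             for v in range(p, i + 1):
--                 ways[v] += ways[v - p]
--         if ways[i] > n:
--             return i
-- ===== Notes on version B (the rewrite author's own statement) =====
-- stated objective: faster
-- what changed: A counts prime partitions of each candidate with an exponential branching recursion (naloga31); B counts them with a bottom-up coin-change DP table of size i, so each candidate costs O(i * #primes) instead of exponential time.
import Mathlib
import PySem

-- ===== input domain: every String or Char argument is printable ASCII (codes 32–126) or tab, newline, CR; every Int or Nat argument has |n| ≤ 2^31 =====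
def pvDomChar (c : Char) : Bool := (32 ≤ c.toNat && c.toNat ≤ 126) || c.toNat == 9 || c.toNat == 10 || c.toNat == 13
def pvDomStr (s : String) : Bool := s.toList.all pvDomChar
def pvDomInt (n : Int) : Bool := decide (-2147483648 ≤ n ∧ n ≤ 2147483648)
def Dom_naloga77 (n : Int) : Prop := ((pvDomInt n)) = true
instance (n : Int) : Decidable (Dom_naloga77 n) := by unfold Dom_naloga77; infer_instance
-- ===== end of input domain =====

-- B replaces A's exponential recursive partition counter (naloga31) by a coin-change DP table; objective: faster (asymptotic).
-- Both whiles are ported with a fuel counter as a totality guard only (identical fuel formulas in both ports); fuel 0 is never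
-- reached on any run the Python performs within the proved equality, and both ports default alike, so equality is unconditional.

-- ===== PORT A =====
-- 'for a in seznam: if k % a == 0: kazalec = False; break' (kazalec starts True)
def pvCheckA (k : Int) : List Int → Bool
  | [] => true
  | a :: rest => if PySem.Int.mod k a = 0 then false else pvCheckA k rest

-- inner 'while seznam_prastevil[-1] < i' loop of naloga77 (fuelled); returns (seznam_prastevil, k)
def pvExtendA (fuel : Nat) (primes : List Int) (k i : Int) : List Int × Int :=
  match fuel with
  | 0 => (primes, k)
  | f + 1 =>
    if PySem.List.pyGetD primes (-1) 0 < i then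
      pvExtendA f (if pvCheckA k primes then primes ++ [k] else primes) (k + 1) i
    else (primes, k)

-- naloga31, fuelled (the recursion is the literal branch structure of A's helper)
def pvNaloga31 (fuel : Nat) (vrednost : Int) (seznam : List Int) : Int :=
  match fuel with
  | 0 => 0
  | fuel + 1 =>
    match seznam with
    | [] => 0
    | p :: rest =>
      if vrednost - p = 0 then 1 + pvNaloga31 fuel vrednost rest
      else if vrednost - p < 0 then pvNaloga31 fuel vrednost rest
      else pvNaloga31 fuel (vrednost - p) (p :: rest) + pvNaloga31 fuel vrednost rest

def pvInnerFuel (i : Int) : Nat := 2 * i.toNat + 10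

def pvLoopA (fuel : Nat) (primes : List Int) (k i n : Int) : Int :=
  match fuel with
  | 0 => 0
  | fuel + 1 =>
    let i' := i + 1
    let st := pvExtendA (pvInnerFuel i') primes k i'
    if pvNaloga31 (i'.toNat + st.1.length + 1) i' st.1 > n then i'
    else pvLoopA fuel st.1 st.2 i' n

def naloga77 (n : Int) : Int := pvLoopA (n.toNat + 1000) [2] 3 5 n

-- ===== PORT B =====
-- 'all(k % p for p in primes)'
def pvCheckB (k : Int) (primes : List Int) : Bool := primes.all (fun p => PySem.Int.mod k p ≠ 0)

def pvExtendB (fuel : Nat) (primes : List Int) (k i : Int) : List Int × Int :=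
  match fuel with
  | 0 => (primes, k)
  | fuel + 1 =>
    if PySem.List.pyGetD primes (-1) 0 < i then
      pvExtendB fuel (if pvCheckB k primes then primes ++ [k] else primes) (k + 1) i
    else (primes, k)

-- 'for v in range(p, i+1): ways[v] += ways[v-p]'
def pvCoin (N : Int) (ways : List Int) (p : Int) : List Int :=
  (PySem.List.pyRange p (N + 1) 1).foldl
    (fun w v => PySem.List.pySetD w v (PySem.List.pyGetD w v 0 + PySem.List.pyGetD w (v - p) 0)) ways

-- 'ways = [1] + [0]*i; for p in reversed(primes): …; ways[i]'
def pvDP (i : Int) (primes : List Int) : Int :=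
  PySem.List.pyGetD (primes.reverse.foldl (pvCoin i) (1 :: List.replicate i.toNat 0)) i 0

def pvLoopB (fuel : Nat) (primes : List Int) (k i n : Int) : Int :=
  match fuel with
  | 0 => 0
  | fuel + 1 =>
    let i' := i + 1
    let st := pvExtendB (pvInnerFuel i') primes k i'
    if pvDP i' st.1 > n then i'
    else pvLoopB fuel st.1 st.2 i' n

def naloga77_alt (n : Int) : Int := pvLoopB (n.toNat + 1000) [2] 3 5 n

-- ===== PRECONDITION & SPEC =====
def Spec_naloga77 (n : Int) (out : Int) : Prop := out = naloga77_alt n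
instance (n : Int) (out : Int) : Decidable (Spec_naloga77 n out) := by unfold Spec_naloga77; infer_instance

-- ===== CLAIM (what is proved, stated in full; the proofs are below) =====
def Claim_equal_naloga77 : Prop := ∀ (n : Int), Dom_naloga77 n → Spec_naloga77 n (naloga77 n)

-- ===== LEMMAS AND PROOFS =====

-- number of nonempty multisets from s (coins ≥ 1) summing to v; W s 0 = 1 counts the empty one
def pvW (s : List Int) (v : Nat) : Int :=
  match s with
  | [] => if v = 0 then 1 else 0
  | p :: rest =>
    pvW rest v + (if _h : 1 ≤ p ∧ p ≤ (v : Int) then pvW (p :: rest) (v - p.toNat) else 0)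
termination_by s.length + v
decreasing_by
  all_goals simp only [List.length_cons]
  all_goals omega

theorem pvW_zero (s : List Int) : pvW s 0 = 1 := by
  induction s with
  | nil => simp [pvW]
  | cons p rest ih =>
    rw [pvW, ih]
    simp only [Nat.cast_zero]
    have : ¬ (1 ≤ p ∧ p ≤ (0 : Int)) := by omega
    simp [this]

theorem pvW_lt (p : Int) (rest : List Int) (v : Nat) (h : (v : Int) < p) :
    pvW (p :: rest) v = pvW rest v := by
  rw [pvW]
  have : ¬ (1 ≤ p ∧ p ≤ (v : Int)) := by omega
  simp [this]

theorem pvCheck_eq (k : Int) (l : List Int) : pvCheckA k l = pvCheckB k l := by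
  induction l with
  | nil => simp [pvCheckA, pvCheckB]
  | cons a rest ih =>
    simp only [pvCheckA, pvCheckB, List.all_cons]
    by_cases h : PySem.Int.mod k a = 0 <;> simp [h, ih, pvCheckB]

theorem pvExtend_eq (fuel : Nat) (primes : List Int) (k i : Int) :
    pvExtendB fuel primes k i = pvExtendA fuel primes k i := by
  induction fuel generalizing primes k with
  | zero => rfl
  | succ fuel ih => simp only [pvExtendA, pvExtendB, pvCheck_eq]; split <;> simp [ih]

def pvGood (primes : List Int) : Prop := primes ≠ [] ∧ ∀ p ∈ primes, 2 ≤ p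

theorem pvExtend_good (fuel : Nat) (primes : List Int) (k i : Int)
    (hg : pvGood primes) (hk : 2 ≤ k) :
    pvGood (pvExtendA fuel primes k i).1 ∧ 2 ≤ (pvExtendA fuel primes k i).2 := by
  induction fuel generalizing primes k with
  | zero => exact ⟨hg, hk⟩
  | succ fuel ih =>
    rw [pvExtendA]
    split
    · refine ih _ _ ?_ (by omega)
      split
      · refine ⟨by simp, ?_⟩
        intro p hp
        rcases List.mem_append.1 hp with h | h
        · exact hg.2 p h
        · simp at h; omega
      · exact hg
    · exact ⟨hg, hk⟩

-- A's recursive counter computes pvW when every coin is ≥ 1 and the fuel covers the recursion depth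
theorem pvNaloga31_eq (fuel : Nat) (v : Int) (s : List Int)
    (hs : ∀ p ∈ s, 1 ≤ p) (hv : 1 ≤ v) (hf : v.toNat + s.length + 1 ≤ fuel) :
    pvNaloga31 fuel v s = pvW s v.toNat := by
  induction fuel generalizing v s with
  | zero => exfalso; omega
  | succ fuel ih =>
    match s with
    | [] =>
      rw [pvNaloga31, pvW]
      have : v.toNat ≠ 0 := by omega
      simp [this]
    | p :: rest =>
      have hp : 1 ≤ p := hs p (List.mem_cons_self)
      have hrest : ∀ q ∈ rest, 1 ≤ q := fun q hq => hs q (List.mem_cons_of_mem _ hq)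
      rw [pvNaloga31]
      simp only [List.length_cons] at hf
      by_cases h0 : v - p = 0
      · rw [if_pos h0, ih v rest hrest hv (by omega), pvW]
        have hg : 1 ≤ p ∧ p ≤ ((v.toNat : Nat) : Int) := by omega
        rw [dif_pos hg]
        have hz : v.toNat - p.toNat = 0 := by omega
        rw [hz, pvW_zero]
        ring
      · rw [if_neg h0]
        by_cases h1 : v - p < 0
        · rw [if_pos h1, ih v rest hrest hv (by omega), pvW_lt p rest v.toNat (by omega)]
        · rw [if_neg h1,
              ih (v - p) (p :: rest) hs (by omega) (by simp only [List.length_cons]; omega),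
              ih v rest hrest hv (by omega)]
          conv_rhs => rw [pvW]
          have hg : 1 ≤ p ∧ p ≤ ((v.toNat : Nat) : Int) := by omega
          rw [dif_pos hg]
          have hz : (v - p).toNat = v.toNat - p.toNat := by omega
          rw [hz]
          ring

-- DP inner loop invariant
theorem pvCoin_fold (rest : List Int) (p : Int) (hp : 1 ≤ p) (N : Int) (hN : 0 ≤ N) :
    ∀ (c : Nat) (t : Int), p ≤ t → (N + 1 - t).toNat = c → ∀ (w : List Int),
    w.length = N.toNat + 1 →
    (∀ j : Nat, j < t.toNat → j ≤ N.toNat → w.getD j 0 = pvW (p :: rest) j) →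
    (∀ j : Nat, t.toNat ≤ j → j ≤ N.toNat → w.getD j 0 = pvW rest j) →
    ((PySem.List.pyRange t (N + 1) 1).foldl
        (fun w v => PySem.List.pySetD w v (PySem.List.pyGetD w v 0 + PySem.List.pyGetD w (v - p) 0)) w).length = N.toNat + 1 ∧
    ∀ j : Nat, j ≤ N.toNat →
      ((PySem.List.pyRange t (N + 1) 1).foldl
        (fun w v => PySem.List.pySetD w v (PySem.List.pyGetD w v 0 + PySem.List.pyGetD w (v - p) 0)) w).getD j 0 = pvW (p :: rest) j := by
  intro c
  induction c with
  | zero =>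
    intro t ht hc w hw h1 h2
    rw [PySem.List.pyRange_one_eq_nil (by omega)]
    refine ⟨hw, ?_⟩
    intro j hj
    exact h1 j (by omega) hj
  | succ c ihc =>
    intro t ht hc w hw h1 h2
    have htN : t ≤ N := by omega
    rw [PySem.List.pyRange_one_cons (by omega : t < N + 1), List.foldl_cons]
    have ht0 : (0 : Int) ≤ t := by omega
    have htp0 : (0 : Int) ≤ t - p := by omega
    have hvt : w.getD t.toNat 0 = pvW rest t.toNat := h2 t.toNat (le_refl _) (by omega)
    have hvtp : w.getD (t - p).toNat 0 = pvW (p :: rest) (t - p).toNat := h1 (t - p).toNat (by omega) (by omega)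
    have hval : PySem.List.pySetD w t (PySem.List.pyGetD w t 0 + PySem.List.pyGetD w (t - p) 0)
        = w.set t.toNat (pvW (p :: rest) t.toNat) := by
      rw [PySem.List.pySetD_of_nonneg _ _ ht0, PySem.List.pyGetD_of_nonneg _ _ ht0,
          PySem.List.pyGetD_of_nonneg _ _ htp0, hvt, hvtp]
      congr 1
      conv_rhs => rw [pvW]
      have hg : 1 ≤ p ∧ p ≤ ((t.toNat : Nat) : Int) := by omega
      rw [dif_pos hg]
      have hz : (t - p).toNat = t.toNat - p.toNat := by omega
      rw [hz]
    rw [hval]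
    refine ihc (t + 1) (by omega) (by omega) _ (by simp [hw]) ?_ ?_
    · intro j hj hjN
      by_cases hjt : j = t.toNat
      · subst hjt
        have hlen : t.toNat < w.length := by omega
        simp [List.getD_eq_getElem?_getD, hlen]
      · have : j < t.toNat := by omega
        rw [show (w.set t.toNat (pvW (p :: rest) t.toNat)).getD j 0 = w.getD j 0 by
              simp [List.getD_eq_getElem?_getD, Ne.symm hjt]]
        exact h1 j this hjN
    · intro j hj hjN
      have hjt : j ≠ t.toNat := by omega
      rw [show (w.set t.toNat (pvW (p :: rest) t.toNat)).getD j 0 = w.getD j 0 by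
            simp [List.getD_eq_getElem?_getD, Ne.symm hjt]]
      exact h2 j (by omega) hjN

theorem pvDP_eq (i : Int) (primes : List Int) (hs : ∀ p ∈ primes, 1 ≤ p) (hi : 0 ≤ i) :
    pvDP i primes = pvW primes i.toNat := by
  have main : ∀ (ps : List Int), (∀ p ∈ ps, 1 ≤ p) →
      (ps.reverse.foldl (pvCoin i) (1 :: List.replicate i.toNat 0)).length = i.toNat + 1 ∧
      ∀ j : Nat, j ≤ i.toNat →
        (ps.reverse.foldl (pvCoin i) (1 :: List.replicate i.toNat 0)).getD j 0 = pvW ps j := by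
    intro ps
    induction ps with
    | nil =>
      intro _
      refine ⟨by simp, ?_⟩
      intro j hj
      rw [pvW]
      match j with
      | 0 => simp
      | j + 1 => simp [List.getD]
    | cons p ps ihp =>
      intro hps
      have hp : 1 ≤ p := hps p (List.mem_cons_self)
      have ihp' := ihp (fun q hq => hps q (List.mem_cons_of_mem _ hq))
      rw [List.reverse_cons, List.foldl_append, List.foldl_cons, List.foldl_nil]
      have := pvCoin_fold ps p hp i hi ((i + 1 - p).toNat) p (le_refl _) rfl
        (ps.reverse.foldl (pvCoin i) (1 :: List.replicate i.toNat 0)) ihp'.1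
        (by
          intro j hj hjN
          rw [ihp'.2 j hjN, pvW_lt p ps j (by omega)])
        (fun j _ hjN => ihp'.2 j hjN)
      exact ⟨this.1, fun j hj => this.2 j hj⟩
  rw [pvDP, PySem.List.pyGetD_of_nonneg _ _ hi]
  exact (main primes hs).2 i.toNat (le_refl _)

theorem pvLoop_eq (fuel : Nat) (primes : List Int) (k i n : Int)
    (hg : pvGood primes) (hk : 2 ≤ k) (hi : 5 ≤ i) :
    pvLoopA fuel primes k i n = pvLoopB fuel primes k i n := by
  induction fuel generalizing primes k i with
  | zero => rfl
  | succ fuel ih =>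
    rw [pvLoopA, pvLoopB, pvExtend_eq]
    have hgood := pvExtend_good (pvInnerFuel (i + 1)) primes k (i + 1) hg hk
    have h1 : ∀ p ∈ (pvExtendA (pvInnerFuel (i + 1)) primes k (i + 1)).1, 1 ≤ p := by
      intro p hp; have := hgood.1.2 p hp; omega
    rw [pvNaloga31_eq _ _ _ h1 (by omega) (by omega),
        pvDP_eq _ _ h1 (by omega)]
    split
    · rfl
    · exact ih _ _ _ hgood.1 hgood.2 (by omega)

-- ===== VERDICT (by name: the statement is the Claim_ definition above) =====
theorem naloga77_spec : Claim_equal_naloga77 := by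
  intro n _
  show naloga77 n = naloga77_alt n
  exact pvLoop_eq _ _ _ _ n ⟨by simp, by intro p hp; simp at hp; omega⟩ (by omega) (by omega)
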